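-- pv_equiv track=rewrite | github.com/Molorov/DAN_plus | OCR/ocr_dataset_manager.py | merge_line_labels
-- ===== SOURCE A (Python) =====
-- def merge_line_labels(line_labels, line_lans, lan_to_merge):
--     merged_line_labels = []
--     merged_line_lans = []
--     for line_label, line_lan in zip(line_labels, line_lans):
--         if len(merged_line_lans) and line_lan == merged_line_lans[-1] == lan_to_merge:
--             merged_line_labels[-1] += line_label
--         else:
--             merged_line_labels.append(line_label)
--             merged_line_lans.append(line_lan)
--     return merged_line_labels, merged_line_lans
-- ===== SOURCE B (Python) =====
-- def merge_line_labels(line_labels, line_lans, lan_to_merge):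
--     pairs = list(zip(line_labels, line_lans))
--     out_labels = []
--     out_lans = []
--     i = 0
--     n = len(pairs)
--     while i < n:
--         lan = pairs[i][1]
--         j = i + 1
--         while j < n and pairs[j][1] == lan:
--             j += 1
--         run = pairs[i:j]
--         if lan == lan_to_merge:
--             out_labels.append(''.join(p[0] for p in run))
--             out_lans.append(lan)
--         else:
--             out_labels.extend(p[0] for p in run)
--             out_lans.extend(p[1] for p in run)
--         i = j
--     return out_labels, out_lans
-- ===== Notes on version B (the rewrite author's own statement) =====
-- stated objective: alternative
-- what changed: B first splits the zipped (label, language) sequence into maximal consecutive same-language runs and then emits each run whole (one concatenated label if the run's language is lan_to_merge, the run's elements otherwise), instead of A's element-by-element loop that mutates the last emitted label in place.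
import Mathlib
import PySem

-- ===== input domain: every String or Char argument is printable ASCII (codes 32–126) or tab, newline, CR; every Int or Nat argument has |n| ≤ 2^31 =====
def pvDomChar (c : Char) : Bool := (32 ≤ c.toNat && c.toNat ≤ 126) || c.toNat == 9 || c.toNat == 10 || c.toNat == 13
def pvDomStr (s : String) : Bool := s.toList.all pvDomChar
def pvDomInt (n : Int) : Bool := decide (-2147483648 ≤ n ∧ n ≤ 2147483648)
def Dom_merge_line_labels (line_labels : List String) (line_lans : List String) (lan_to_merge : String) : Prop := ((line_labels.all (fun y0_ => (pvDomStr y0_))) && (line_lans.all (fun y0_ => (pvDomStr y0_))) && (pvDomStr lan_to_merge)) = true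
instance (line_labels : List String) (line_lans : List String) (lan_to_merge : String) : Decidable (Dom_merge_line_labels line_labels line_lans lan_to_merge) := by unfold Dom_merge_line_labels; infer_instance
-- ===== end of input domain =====

-- B replaces A's element-by-element loop (which rewrites the last emitted label) by
-- splitting the zipped input into maximal consecutive same-language runs and emitting
-- each run whole; alternative decomposition, same asymptotic cost.


-- ===== PORT A =====
-- one iteration of A's for-loop: state = (merged_line_labels, merged_line_lans)
def aStepMLL (lan_to_merge : String) (acc : List String × List String)
    (p : String × String) : List String × List String :=
  if acc.2 ≠ [] ∧ p.2 = acc.2.getLast! ∧ acc.2.getLast! = lan_to_merge then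
    (acc.1.dropLast ++ [acc.1.getLast! ++ p.1], acc.2)
  else
    (acc.1 ++ [p.1], acc.2 ++ [p.2])

def merge_line_labels (line_labels : List String) (line_lans : List String) (lan_to_merge : String) : List String × List String :=
  (line_labels.zip line_lans).foldl (aStepMLL lan_to_merge) ([], [])

-- ===== PORT B =====
-- B's inner scan to index j: the maximal run of pairs sharing the first pair's language
def runsMLL : List (String × String) → List (List (String × String))
  | [] => []
  | p :: rest =>
      (p :: rest.takeWhile (fun q => q.2 == p.2)) ::
        runsMLL (rest.dropWhile (fun q => q.2 == p.2))
  termination_by l => l.length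
  decreasing_by
    simp only [List.length_cons]
    exact Nat.lt_succ_of_le (List.length_dropWhile_le _ _)

-- B's loop body: emit one run
def emitMLL (lan_to_merge : String) (run : List (String × String)) : List String × List String :=
  match run with
  | [] => ([], [])
  | (lab, lan) :: t =>
      if lan = lan_to_merge then ([(t.map Prod.fst).foldl (· ++ ·) lab], [lan])
      else (lab :: t.map Prod.fst, lan :: t.map Prod.snd)

def merge_line_labels_alt (line_labels : List String) (line_lans : List String) (lan_to_merge : String) : List String × List String :=
  (runsMLL (line_labels.zip line_lans)).foldr
    (fun r acc => let e := emitMLL lan_to_merge r; (e.1 ++ acc.1, e.2 ++ acc.2)) ([], [])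

-- ===== PRECONDITION & SPEC =====
def Spec_merge_line_labels (line_labels : List String) (line_lans : List String) (lan_to_merge : String) (out : List String × List String) : Prop := out = merge_line_labels_alt line_labels line_lans lan_to_merge
instance (line_labels : List String) (line_lans : List String) (lan_to_merge : String) (out : List String × List String) : Decidable (Spec_merge_line_labels line_labels line_lans lan_to_merge out) := by unfold Spec_merge_line_labels; infer_instance

-- ===== CLAIM (what is proved, stated in full; the proofs are below) =====
def Claim_equal_merge_line_labels : Prop := ∀ (line_labels : List String) (line_lans : List String) (lan_to_merge : String), Dom_merge_line_labels line_labels line_lans lan_to_merge → Spec_merge_line_labels line_labels line_lans lan_to_merge (merge_line_labels line_labels line_lans lan_to_merge)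

-- ===== LEMMAS AND PROOFS =====

-- front-to-back recursion carrying the pending last element (l0, n0)
def frMLL (m : String) : String → String → List (String × String) → List String × List String
  | l0, n0, [] => ([l0], [n0])
  | l0, n0, (lab, lan) :: ps =>
      if lan = n0 ∧ n0 = m then frMLL m (l0 ++ lab) n0 ps
      else
        let r := frMLL m lab lan ps
        (l0 :: r.1, n0 :: r.2)

def catMLL (m : String) (rs : List (List (String × String))) : List String × List String :=
  rs.foldr (fun r acc => let e := emitMLL m r; (e.1 ++ acc.1, e.2 ++ acc.2)) ([], [])

theorem runsMLL_nil : runsMLL [] = [] := by rw [runsMLL]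

theorem runsMLL_cons (p : String × String) (rest : List (String × String)) :
    runsMLL (p :: rest) =
      (p :: rest.takeWhile (fun q => q.2 == p.2)) ::
        runsMLL (rest.dropWhile (fun q => q.2 == p.2)) := by
  rw [runsMLL]

theorem catMLL_nil (m : String) : catMLL m [] = ([], []) := rfl

theorem catMLL_cons (m : String) (r : List (String × String))
    (rs : List (List (String × String))) :
    catMLL m (r :: rs) = ((emitMLL m r).1 ++ (catMLL m rs).1, (emitMLL m r).2 ++ (catMLL m rs).2) := rfl

theorem getLast!_concat_mll (xs : List String) (x : String) :
    (xs ++ [x]).getLast! = x := by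
  induction xs with
  | nil => rfl
  | cons a t ih =>
      cases t with
      | nil => rfl
      | cons b u => simp [List.getLast!, List.getLast]

theorem foldl_fr_mll (m : String) (ps : List (String × String)) :
    ∀ (ls ns : List String) (l0 n0 : String),
      ps.foldl (aStepMLL m) (ls ++ [l0], ns ++ [n0]) =
        (ls ++ (frMLL m l0 n0 ps).1, ns ++ (frMLL m l0 n0 ps).2) := by
  induction ps with
  | nil => intro ls ns l0 n0; simp [frMLL]
  | cons p ps ih =>
      intro ls ns l0 n0
      obtain ⟨lab, lan⟩ := p
      by_cases h : lan = n0 ∧ n0 = m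
      · have hs : aStepMLL m (ls ++ [l0], ns ++ [n0]) (lab, lan)
            = (ls ++ [l0 ++ lab], ns ++ [n0]) := by
          simp [aStepMLL, h.1, h.2]
        simp only [List.foldl_cons, hs, ih, frMLL, if_pos h]
      · have hs : aStepMLL m (ls ++ [l0], ns ++ [n0]) (lab, lan)
            = ((ls ++ [l0]) ++ [lab], (ns ++ [n0]) ++ [lan]) := by
          simp only [aStepMLL, getLast!_concat_mll]
          rw [if_neg]
          rintro ⟨-, h1, h2⟩; exact h ⟨h1, h2⟩
        simp only [List.foldl_cons, hs, ih, frMLL, if_neg h]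
        simp

theorem fr_cat_mll (m : String) (ps : List (String × String)) :
    ∀ (l0 n0 : String),
      catMLL m (runsMLL ((l0, n0) :: ps)) = frMLL m l0 n0 ps := by
  induction ps with
  | nil =>
      intro l0 n0
      rw [runsMLL_cons]
      by_cases h : n0 = m <;>
        simp [catMLL_cons, catMLL_nil, runsMLL_nil, emitMLL, frMLL, h]
  | cons p ps ih =>
      intro l0 n0
      obtain ⟨lab, lan⟩ := p
      by_cases hl : lan = n0
      · subst hl
        rw [runsMLL_cons]
        simp only [List.takeWhile_cons, List.dropWhile_cons, beq_self_eq_true, if_pos trivial]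
        by_cases hm : lan = m
        · have hIH := ih (l0 ++ lab) lan
          rw [runsMLL_cons] at hIH
          rw [frMLL, if_pos ⟨rfl, hm⟩, ← hIH]
          simp [catMLL_cons, emitMLL, hm]
        · have hIH := ih lab lan
          rw [runsMLL_cons] at hIH
          rw [frMLL, if_neg (fun hc => hm hc.2), ← hIH]
          simp [catMLL_cons, emitMLL, hm]
      · rw [runsMLL_cons]
        have hb : (((lab, lan)).2 == n0) = false := by simpa using hl
        simp only [List.takeWhile_cons, List.dropWhile_cons, hb, Bool.false_eq_true, if_false]
        rw [frMLL, if_neg (fun hc => hl hc.1), ← ih lab lan]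
        by_cases h : n0 = m <;> simp [catMLL_cons, emitMLL, h]

-- ===== VERDICT (by name: the statement is the Claim_ definition above) =====
theorem merge_line_labels_spec : Claim_equal_merge_line_labels := by
  intro line_labels line_lans lan_to_merge _
  unfold Spec_merge_line_labels merge_line_labels merge_line_labels_alt
  cases hz : line_labels.zip line_lans with
  | nil => simp [runsMLL_nil]
  | cons p ps =>
      obtain ⟨l0, n0⟩ := p
      have h1 : aStepMLL lan_to_merge ([], []) (l0, n0) = ([l0], [n0]) := by
        simp [aStepMLL]
      have h2 := foldl_fr_mll lan_to_merge ps [] [] l0 n0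
      have h3 := fr_cat_mll lan_to_merge ps l0 n0
      show List.foldl (aStepMLL lan_to_merge) ([], []) ((l0, n0) :: ps) = _
      rw [List.foldl_cons, h1]
      have h4 : (([] : List String) ++ [l0], ([] : List String) ++ [n0]) = ([l0], [n0]) := by simp
      rw [← h4, h2, ← h3]
      simp [catMLL]
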